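-- pv_equiv track=rewrite | github.com/synaptent/RingRift | ai-service/app/rules/elimination.py | calculate_cap_height
-- ===== SOURCE A (Python) =====
-- def calculate_cap_height(rings: list[int]) -> int:
--     """
--     Calculate cap height - number of consecutive rings from top belonging to controlling player.
--
--     Note: Python uses reversed ring order (bottom-to-top) while TypeScript uses top-to-bottom.
--     rings[-1] is the top ring in Python.
--
--     Args:
--         rings: Array of player numbers representing the stack (index 0 = bottom, -1 = top)
--
--     Returns:
--         Cap height (0 if stack is empty)
--     """
--     if not rings:
--         return 0
--
--     top_player = rings[-1]
--     cap_height = 0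
--     for ring in reversed(rings):
--         if ring == top_player:
--             cap_height += 1
--         else:
--             break
--     return cap_height
-- ===== SOURCE B (Python) =====
-- from itertools import groupby
--
--
-- def calculate_cap_height(rings: list[int]) -> int:
--     if not rings:
--         return 0
--     lengths = [len(list(g)) for _, g in groupby(rings)]
--     return lengths[-1]
-- ===== Notes on version B (the rewrite author's own statement) =====
-- stated objective: alternative
-- what changed: Replaces the backward scan with early break by a forward run-length grouping of the whole stack (itertools.groupby), returning the length of the last run.
import Mathlib
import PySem

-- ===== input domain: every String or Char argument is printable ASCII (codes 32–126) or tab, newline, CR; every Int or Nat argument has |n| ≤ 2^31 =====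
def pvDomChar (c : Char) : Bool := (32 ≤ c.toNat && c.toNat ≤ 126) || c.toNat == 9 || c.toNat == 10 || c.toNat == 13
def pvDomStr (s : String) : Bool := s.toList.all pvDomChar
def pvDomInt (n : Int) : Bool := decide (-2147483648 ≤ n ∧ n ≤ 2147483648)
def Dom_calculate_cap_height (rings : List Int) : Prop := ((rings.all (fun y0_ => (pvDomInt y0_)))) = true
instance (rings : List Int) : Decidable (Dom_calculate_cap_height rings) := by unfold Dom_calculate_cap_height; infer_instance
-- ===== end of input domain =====

-- B replaces A's backward early-break scan by a full forward run-length grouping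
-- (itertools.groupby) whose last run's length is the answer (objective: alternative).

-- ===== PORT A =====
-- the 'for ring in reversed(rings): … break' loop, counting until the first mismatch
def pvCapLoop (top_player : Int) : List Int → Int
  | [] => 0
  | ring :: rest => if ring == top_player then 1 + pvCapLoop top_player rest else 0

def calculate_cap_height (rings : List Int) : Int :=
  match rings with
  | [] => 0
  | _ :: _ =>
    let top_player := (PySem.List.pyGet? rings (-1)).getD 0  -- rings[-1]; never none here
    pvCapLoop top_player rings.reverse

-- ===== PORT B =====
-- groupby: forward pass carrying the current key and its run length, emitting (key, len) pairs
def pvGroupGo (k : Int) (n : Int) : List Int → List (Int × Int)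
  | [] => [(k, n)]
  | x :: xs => if x == k then pvGroupGo k (n + 1) xs else (k, n) :: pvGroupGo x 1 xs

def calculate_cap_height_alt (rings : List Int) : Int :=
  match rings with
  | [] => 0
  | x :: xs =>
    let lengths := (pvGroupGo x 1 xs).map Prod.snd
    (lengths.getLast?).getD 0  -- lengths[-1]

-- ===== PRECONDITION & SPEC =====
def Spec_calculate_cap_height (rings : List Int) (out : Int) : Prop := out = calculate_cap_height_alt rings
instance (rings : List Int) (out : Int) : Decidable (Spec_calculate_cap_height rings out) := by unfold Spec_calculate_cap_height; infer_instance

-- ===== CLAIM (what is proved, stated in full; the proofs are below) =====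
def Claim_equal_calculate_cap_height : Prop := ∀ (rings : List Int), Dom_calculate_cap_height rings → Spec_calculate_cap_height rings (calculate_cap_height rings)

-- ===== LEMMAS AND PROOFS =====

theorem pvGroupGo_ne_nil (l : List Int) (k n : Int) : pvGroupGo k n l ≠ [] := by
  induction l generalizing k n with
  | nil => simp [pvGroupGo]
  | cons x xs ih => simp only [pvGroupGo]; split <;> simp [ih]

theorem pvCapLoop_append (u v : List Int) (tp : Int) :
    pvCapLoop tp (u ++ v) =
      if u.all (· == tp) then (u.length : Int) + pvCapLoop tp v else pvCapLoop tp u := by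
  induction u with
  | nil => simp
  | cons a u ih =>
    simp only [List.cons_append, pvCapLoop, List.all_cons]
    by_cases h : (a == tp) = true
    · simp only [h, if_true, Bool.true_and, ih]
      by_cases hu : (u.all (· == tp)) = true
      · simp only [hu, if_true, List.length_cons]
        push_cast; ring
      · simp [hu]
    · simp [h]

theorem pvCapLoop_all (l : List Int) (tp : Int) (h : l.all (· == tp)) :
    pvCapLoop tp l = (l.length : Int) := by
  induction l with
  | nil => simp [pvCapLoop]
  | cons a u ih =>
    simp only [List.all_cons, Bool.and_eq_true] at h
    simp [pvCapLoop, h.1, ih h.2]; ring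

-- length of the last run: what B reads off the group list
def pvLastLen (g : List (Int × Int)) : Int := ((g.map Prod.snd).getLast?).getD 0

theorem pvLastLen_cons (p : Int × Int) (g : List (Int × Int)) (h : g ≠ []) :
    pvLastLen (p :: g) = pvLastLen g := by
  unfold pvLastLen
  cases g with
  | nil => exact absurd rfl h
  | cons q g' => simp [List.getLast?_cons_cons]

theorem pvGetLastD_all (xs : List Int) (x : Int) (h : xs.all (· == x) = true) :
    xs.getLastD x = x := by
  induction xs with
  | nil => rfl
  | cons y ys ihy =>
    simp only [List.all_cons, Bool.and_eq_true] at h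
    have hy : y = x := by simpa using h.1
    rw [List.getLastD_cons]
    subst hy
    exact ihy h.2

-- appending one element on top only extends the count when the whole list below matched
theorem pvCapLoop_snoc (l : List Int) (a tp : Int) (h : ¬ l.all (· == a) = true) :
    pvCapLoop tp (l.reverse ++ [a]) = pvCapLoop tp l.reverse := by
  rw [pvCapLoop_append]
  split
  · next hallrev =>
    have hall' : l.all (· == tp) = true := by simpa using hallrev
    have hat : (a == tp) = false := by
      by_contra hc
      have ha : a = tp := by
        cases hb : (a == tp) with
        | false => exact absurd hb hc
        | true => simpa using hb
      subst ha
      exact h hall'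
    rw [pvCapLoop_all l.reverse tp hallrev]
    simp [pvCapLoop, hat]
  · rfl

-- main invariant: the last run length of pvGroupGo k n l
theorem pvGroupGo_lastLen (l : List Int) (k : Int) (n : Int) :
    pvLastLen (pvGroupGo k n l) =
      if l.all (· == k) then n + (l.length : Int)
      else pvCapLoop (l.getLastD k) l.reverse := by
  induction l generalizing k n with
  | nil => simp [pvGroupGo, pvLastLen]
  | cons x xs ih =>
    simp only [pvGroupGo]
    by_cases hx : x == k
    · have hxk : x = k := by simpa using hx
      rw [if_pos hx, ih]
      subst hxk
      by_cases hall : xs.all (· == x) = true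
      · simp [hall, List.all_cons]; ring
      · have hcons : ((x :: xs).all (· == x)) = false := by
          simp [List.all_cons]; simpa using hall
        rw [if_neg hall, if_neg (by simp [hcons])]
        rw [List.getLastD_cons, List.reverse_cons, pvCapLoop_snoc xs x _ (by simpa using hall)]
    · rw [if_neg (by simpa using hx)]
      rw [pvLastLen_cons _ _ (pvGroupGo_ne_nil _ _ _), ih]
      have hcons : ¬ ((x :: xs).all (· == k)) = true := by
        simp [List.all_cons]; intro h'; exact absurd h' (by simpa using hx)
      rw [if_neg hcons, List.getLastD_cons, List.reverse_cons]
      by_cases hall : xs.all (· == x) = true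
      · have hallrev : xs.reverse.all (· == x) = true := by simpa using hall
        rw [if_pos hall, pvGetLastD_all xs x hall, pvCapLoop_append, if_pos hallrev]
        simp [pvCapLoop]; ring
      · rw [if_neg hall, pvCapLoop_snoc xs x _ (by simpa using hall)]

-- ===== VERDICT (by name: the statement is the Claim_ definition above) =====
theorem calculate_cap_height_spec : Claim_equal_calculate_cap_height := by
  intro rings _
  unfold Spec_calculate_cap_height
  match rings with
  | [] => rfl
  | x :: xs =>
    show pvCapLoop _ _ = _
    have htp : (PySem.List.pyGet? (x :: xs) (-1)).getD 0 = (x :: xs).getLastD 0 := by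
      rw [PySem.List.pyGet?_neg_one]
      cases h : (x :: xs).getLast? with
      | none => simp at h
      | some a =>
        simp only [Option.getD_some]
        rw [List.getLastD_eq_getLast?, h]; rfl
    show pvCapLoop ((PySem.List.pyGet? (x :: xs) (-1)).getD 0) (x :: xs).reverse
        = calculate_cap_height_alt (x :: xs)
    rw [htp]
    have hB : calculate_cap_height_alt (x :: xs) = pvLastLen (pvGroupGo x 1 xs) := rfl
    rw [hB, pvGroupGo_lastLen]
    rw [List.getLastD_cons, List.reverse_cons]
    by_cases hall : xs.all (· == x) = true
    · have hallrev : xs.reverse.all (· == x) = true := by simpa using hall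
      rw [if_pos hall, pvGetLastD_all xs x hall, pvCapLoop_append, if_pos hallrev]
      simp [pvCapLoop]; ring
    · rw [if_neg hall, pvCapLoop_snoc xs x _ (by simpa using hall)]
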